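-- pv_equiv track=rewrite | github.com/miliar/Code_Jam_Webscraper | solutions_python/Problem_181/1103.py | make_answer
-- ===== SOURCE A (Python) =====
-- from collections import deque
--
-- def make_answer(S):
--     final_word = deque([S[0]])
--     for char in S[1:]:
--         for next_char in final_word:
--             if char > next_char:
--                 final_word.appendleft(char)
--                 break
--             if char < next_char:
--                 final_word.append(char)
--                 break
--         else:
--             final_word.append(char)
--     return ''.join(final_word)
-- ===== SOURCE B (Python) =====
-- def make_answer(S):
--     m = S[0]
--     all_eq = True
--     pre = []          # chars that go in front, in prepend order
--     suf = [S[0]]      # chars that go behind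
--     for c in S[1:]:
--         if c > m:
--             pre.append(c)
--             m = c
--             all_eq = False
--         elif c == m and not all_eq:
--             pre.append(c)
--         else:
--             suf.append(c)
--             if c < m:
--                 all_eq = False
--     return ''.join(reversed(pre)) + ''.join(suf)
-- ===== Notes on version B (the rewrite author's own statement) =====
-- stated objective: faster
-- what changed: Instead of rescanning the growing deque for every character, B tracks the current maximum and an all-chars-equal flag, decides front/back in O(1) per character, and joins the two halves once at the end.
import Mathlib
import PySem

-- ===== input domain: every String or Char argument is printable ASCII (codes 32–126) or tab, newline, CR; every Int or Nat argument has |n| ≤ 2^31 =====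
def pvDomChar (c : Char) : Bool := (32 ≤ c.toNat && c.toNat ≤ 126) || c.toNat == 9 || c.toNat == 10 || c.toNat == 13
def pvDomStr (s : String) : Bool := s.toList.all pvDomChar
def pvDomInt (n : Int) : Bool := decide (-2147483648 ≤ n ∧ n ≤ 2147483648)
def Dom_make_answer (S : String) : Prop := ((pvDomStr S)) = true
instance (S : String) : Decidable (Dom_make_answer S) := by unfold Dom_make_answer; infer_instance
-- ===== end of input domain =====

-- B replaces A's O(n^2) rescans of the deque by an O(1) max/all-equal test per character.

-- ===== PORT A =====
-- inner 'for next_char in final_word' loop with for-else: true = appendleft, false = append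
def pvAInner (c : Char) : List Char → Bool
  | [] => false
  | x :: rest => if x < c then true else if c < x then false else pvAInner c rest

def pvAStep (fw : List Char) (c : Char) : List Char :=
  if pvAInner c fw then c :: fw else fw ++ [c]

def make_answer (S : String) : String :=
  match S.toList with
  | [] => ""   -- A raises IndexError on "" (excluded by Pre_)
  | c :: rest => String.ofList (rest.foldl pvAStep [c])

-- ===== PORT B =====
-- state: (m, all_eq, pre, suf)
def pvBStep (st : Char × Bool × List Char × List Char) (c : Char) :
    Char × Bool × List Char × List Char :=
  match st with
  | (m, alleq, pre, suf) =>
    if m < c then (c, false, pre ++ [c], suf)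
    else if c == m && !alleq then (m, alleq, pre ++ [c], suf)
    else (m, if c < m then false else alleq, pre, suf ++ [c])

def make_answer_alt (S : String) : String :=
  match S.toList with
  | [] => ""   -- B raises IndexError on "" (excluded by Pre_)
  | c :: rest =>
    match rest.foldl pvBStep (c, true, [], [c]) with
    | (_, _, pre, suf) => String.ofList (pre.reverse ++ suf)

-- ===== PRECONDITION & SPEC =====
-- A indexes S[0], so it raises IndexError on the empty string; Pre_ excludes exactly that.
def Pre_make_answer (S : String) : Prop := S ≠ ""
instance (S : String) : Decidable (Pre_make_answer S) := by unfold Pre_make_answer; infer_instance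
def pvWitness_make_answer : String := "ba"

def Spec_make_answer (S : String) (out : String) : Prop := out = make_answer_alt S
instance (S : String) (out : String) : Decidable (Spec_make_answer S out) := by unfold Spec_make_answer; infer_instance

-- ===== CLAIM (what is proved, stated in full; the proofs are below) =====
def Claim_equal_make_answer : Prop := ∀ (S : String), Dom_make_answer S → Pre_make_answer S → Spec_make_answer S (make_answer S)

-- ===== LEMMAS AND PROOFS =====

-- the for-else loop on a list of chars all ≤ c returns 'prepend' iff some char is strictly below c
theorem pvAInner_all_le (c : Char) (l : List Char) (h : ∀ x ∈ l, x ≤ c) :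
    pvAInner c l = !(l.all (· == c)) := by
  induction l with
  | nil => simp [pvAInner]
  | cons x r ih =>
    have hx : x ≤ c := h x (by simp)
    by_cases hlt : x < c
    · simp [pvAInner, hlt]
      exact Or.inl (ne_of_lt hlt)
    · have hxc : x = c := le_antisymm hx (not_lt.1 hlt)
      subst hxc
      simp [pvAInner, ih (fun y hy => h y (by simp [hy]))]

-- invariant tying A's deque to B's state
def pvInv (fw : List Char) (st : Char × Bool × List Char × List Char) : Prop :=
  match st with
  | (m, alleq, pre, suf) =>
    fw = pre.reverse ++ suf ∧ fw.head? = some m ∧ (∀ x ∈ fw, x ≤ m) ∧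
      alleq = fw.all (· == m)

theorem pvInv_step (fw : List Char) (st : Char × Bool × List Char × List Char)
    (c : Char) (h : pvInv fw st) : pvInv (pvAStep fw c) (pvBStep st c) := by
  obtain ⟨m, alleq, pre, suf⟩ := st
  obtain ⟨hfw, hhd, hle, haq⟩ := h
  cases fw with
  | nil => simp at hhd
  | cons y t =>
  have hym : m = y := by simp at hhd; exact hhd.symm
  subst hym
  have hle' : ∀ x ∈ t, x ≤ m := fun x hx => hle x (by simp [hx])
  have hinner : pvAInner c (m :: t) = (decide (m < c) || (c == m && !alleq)) := by
    by_cases hmc : m < c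
    · simp [pvAInner, hmc]
    · by_cases hcm : c < m
      · have : ¬ c = m := ne_of_lt hcm
        simp [pvAInner, hmc, hcm, this]
      · have hcm' : c = m := le_antisymm (not_lt.1 hmc) (not_lt.1 hcm)
        subst hcm'
        simp [pvAInner, haq, pvAInner_all_le c t hle', List.all_cons]
  by_cases hmc : m < c
  · -- prepend, new max c
    have hAin : pvAInner c (m :: t) = true := by simp [hinner, hmc]
    have hA : pvAStep (m :: t) c = c :: m :: t := by simp [pvAStep, hAin]
    have hB : pvBStep (m, alleq, pre, suf) c = (c, false, pre ++ [c], suf) := by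
      simp [pvBStep, hmc]
    rw [hA, hB]
    refine ⟨by rw [hfw]; simp, by simp, ?_, ?_⟩
    · intro x hx
      rcases List.mem_cons.1 hx with h1 | h1
      · exact h1.le
      · exact le_of_lt (lt_of_le_of_lt (hle x h1) hmc)
    · symm
      simp
      exact fun h => absurd h (ne_of_lt hmc)
  · by_cases hcm : c < m
    · -- append, all_eq false
      have hAin : pvAInner c (m :: t) = false := by
        have h1 : ¬ c = m := ne_of_lt hcm
        simp [hinner, hmc, h1]
      have hA : pvAStep (m :: t) c = m :: t ++ [c] := by simp [pvAStep, hAin]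
      have hB : pvBStep (m, alleq, pre, suf) c = (m, false, pre, suf ++ [c]) := by
        simp [pvBStep, hmc, hcm, ne_of_lt hcm]
      rw [hA, hB]
      refine ⟨by rw [hfw]; simp, by simp, ?_, ?_⟩
      · intro x hx
        simp at hx
        rcases hx with h1 | h1 | h1
        · exact h1.le
        · exact hle x (by simp [h1])
        · subst h1; exact le_of_lt hcm
      · symm
        simp
        exact fun _ => ne_of_lt hcm
    · have hcm' : c = m := le_antisymm (not_lt.1 hmc) (not_lt.1 hcm)
      subst hcm'
      by_cases haq' : alleq = true
      · -- all equal: append, stays all equal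
        subst haq'
        have hAin : pvAInner c (c :: t) = false := by simp [hinner]
        have hA : pvAStep (c :: t) c = c :: t ++ [c] := by simp [pvAStep, hAin]
        have hB : pvBStep (c, true, pre, suf) c = (c, true, pre, suf ++ [c]) := by
          simp [pvBStep]
        rw [hA, hB]
        have hall : ∀ x ∈ c :: t, (x == c) = true := List.all_eq_true.mp haq.symm
        refine ⟨by rw [hfw]; simp, by simp, ?_, ?_⟩
        · intro x hx
          simp at hx
          rcases hx with h1 | h1 | h1
          · exact h1.le
          · exact hle x (by simp [h1])
          · exact h1.le
        · symm
          rw [List.all_eq_true]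
          intro x hx
          simp at hx
          rcases hx with h1 | h1 | h1
          · simp [h1]
          · exact hall x (by simp [h1])
          · simp [h1]
      · -- not all equal: prepend
        have haqf : alleq = false := by simpa [Bool.not_eq_true] using haq'
        subst haqf
        have hAin : pvAInner c (c :: t) = true := by simp [hinner]
        have hA : pvAStep (c :: t) c = c :: c :: t := by simp [pvAStep, hAin]
        have hB : pvBStep (c, false, pre, suf) c = (c, false, pre ++ [c], suf) := by
          simp [pvBStep]
        rw [hA, hB]
        refine ⟨by rw [hfw]; simp, by simp, ?_, ?_⟩
        · intro x hx
          rcases List.mem_cons.1 hx with h1 | h1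
          · exact h1.le
          · exact hle x h1
        · symm
          have hall : ((c :: t).all (· == c)) = false := haq.symm
          simp at hall ⊢
          obtain ⟨x, hx1, hx2⟩ := hall
          exact ⟨x, hx1, hx2⟩

theorem pvInv_foldl (cs : List Char) (fw : List Char)
    (st : Char × Bool × List Char × List Char) (h : pvInv fw st) :
    pvInv (cs.foldl pvAStep fw) (cs.foldl pvBStep st) := by
  induction cs generalizing fw st with
  | nil => exact h
  | cons c r ih => exact ih _ _ (pvInv_step fw st c h)

-- ===== VERDICT (by name: the statement is the Claim_ definition above) =====
theorem make_answer_spec : Claim_equal_make_answer := by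
  intro S _ hpre
  unfold Spec_make_answer make_answer make_answer_alt
  cases hS : S.toList with
  | nil =>
    exact absurd (by simpa [String.ofList_toList] using congrArg String.ofList hS) hpre
  | cons c rest =>
    have h := pvInv_foldl rest [c] (c, true, [], [c]) (by
      refine ⟨by simp, by simp, by simp, by simp⟩)
    obtain ⟨m, alleq, pre, suf⟩ := rest.foldl pvBStep (c, true, [], [c])
    simp only [pvInv] at h
    simp [h.1]
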